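-- pv_equiv track=rewrite | github.com/This-AnneGeorge/ISLabMidsem | multiplicative.py | multiplicative_decrypt
-- ===== SOURCE A (Python) =====
-- alphabet = "ABCDEFGHIJKLMNOPQRSTUVWXYZ"
--
-- def mod_inverse(a, m):
--     # Extended Euclidean Algorithm
--     for i in range(1, m):
--         if (a * i) % m == 1:
--             return i
--     return None  # Return None if inverse doesn't exist
--
-- def multiplicative_decrypt(cipher_text, key):
--     decrypted_text = ""
--     inv_key = mod_inverse(key, 26)  # Compute modular inverse of key
--     if inv_key is None:
--         return "Cannot decrypt: key has no modular inverse"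
--     for char in cipher_text:
--         if char in alphabet:
--             index = alphabet.index(char)
--             new_index = (index * inv_key) % 26
--             decrypted_text += alphabet[new_index]
--         else:
--             decrypted_text += char
--     return decrypted_text
-- ===== SOURCE B (Python) =====
-- alphabet = "ABCDEFGHIJKLMNOPQRSTUVWXYZ"
--
-- def multiplicative_decrypt(cipher_text, key):
--     # extended-Euclid inverse instead of trial search, then a precomputed
--     # substitution table so the text is decrypted in one lookup pass
--     old_r, r = 26, key % 26
--     old_t, t = 0, 1
--     while r > 0:
--         q = old_r // r
--         old_r, r = r, old_r - q * r
--         old_t, t = t, old_t - q * t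
--     if old_r != 1:
--         return "Cannot decrypt: key has no modular inverse"
--     inv = old_t % 26
--     table = {c: alphabet[(i * inv) % 26] for i, c in enumerate(alphabet)}
--     return "".join(table.get(ch, ch) for ch in cipher_text)
-- ===== Notes on version B (the rewrite author's own statement) =====
-- stated objective: alternative
-- what changed: B computes the inverse key with the extended Euclidean algorithm instead of A's trial search over 1..25, and decrypts via a substitution table built once from the alphabet instead of A's per-character membership test plus index scan.
import Mathlib
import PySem

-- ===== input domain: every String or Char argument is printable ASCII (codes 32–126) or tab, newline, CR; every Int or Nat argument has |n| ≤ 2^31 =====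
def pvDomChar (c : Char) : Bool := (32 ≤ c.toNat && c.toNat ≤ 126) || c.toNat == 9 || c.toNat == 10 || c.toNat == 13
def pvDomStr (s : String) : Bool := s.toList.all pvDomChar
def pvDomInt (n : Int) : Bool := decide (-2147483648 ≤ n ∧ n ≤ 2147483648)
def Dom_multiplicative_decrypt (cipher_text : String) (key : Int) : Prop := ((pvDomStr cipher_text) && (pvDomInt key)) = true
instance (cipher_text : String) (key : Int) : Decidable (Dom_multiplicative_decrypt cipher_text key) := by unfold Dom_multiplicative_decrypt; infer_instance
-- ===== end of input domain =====

-- B replaces A's trial-search inverse by the extended Euclidean algorithm and the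
-- per-character membership/index scan by a substitution table built once (objective: alternative).

-- ===== PORT A =====
def pvAlphabet : List Char := "ABCDEFGHIJKLMNOPQRSTUVWXYZ".toList

-- first i in range(1, m) with (a*i) % m == 1, else None (an early-return search loop)
def mod_inverse (a m : Int) : Option Int :=
  (PySem.List.pyRange 1 m 1).find? (fun i => PySem.Int.mod (a * i) m == 1)

def multiplicative_decrypt (cipher_text : String) (key : Int) : String :=
  match mod_inverse key 26 with
  | none => "Cannot decrypt: key has no modular inverse"
  | some inv_key =>
      -- decrypted_text built char by char; alphabet[new_index] is always in range
      -- (0 ≤ new_index < 26), so pyGetD's default 'A' is never used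
      String.ofList (cipher_text.toList.foldl (fun acc char =>
        if PySem.Chars.isIn [char] pvAlphabet then
          acc ++ [PySem.List.pyGetD pvAlphabet
                    (PySem.Int.mod (PySem.Chars.find pvAlphabet [char] * inv_key) 26) 'A']
        else acc ++ [char]) [])

-- ===== PORT B =====
-- the while-loop of Source B, step for step; `fuel` is only a totality guard: the loop
-- runs at most r.toNat times (r decreases and stays nonnegative), and every call
-- below passes fuel = 26 with 0 ≤ r < 26
def egcdLoop (fuel : Nat) (old_r r old_t t : Int) : Int × Int :=
  match fuel with
  | 0 => (old_r, old_t)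
  | fuel + 1 =>
    if 0 < r then
      egcdLoop fuel r (old_r - PySem.Int.floordiv old_r r * r) t
        (old_t - PySem.Int.floordiv old_r r * t)
    else (old_r, old_t)

def multiplicative_decrypt_alt (cipher_text : String) (key : Int) : String :=
  let p := egcdLoop 26 26 (PySem.Int.mod key 26) 0 1
  if p.1 ≠ 1 then "Cannot decrypt: key has no modular inverse"
  else
    let inv := PySem.Int.mod p.2 26
    -- {c: alphabet[(i*inv) % 26] for i, c in enumerate(alphabet)}; the index is always in range
    let table : PySem.Dict Char Char := PySem.Dict.ofList
      ((PySem.List.enumerate pvAlphabet).map (fun q =>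
        (q.2, PySem.List.pyGetD pvAlphabet (PySem.Int.mod (q.1 * inv) 26) 'A')))
    String.ofList (cipher_text.toList.map (fun ch => table.getD ch ch))

-- ===== PRECONDITION & SPEC =====
def Spec_multiplicative_decrypt (cipher_text : String) (key : Int) (out : String) : Prop := out = multiplicative_decrypt_alt cipher_text key
instance (cipher_text : String) (key : Int) (out : String) : Decidable (Spec_multiplicative_decrypt cipher_text key out) := by unfold Spec_multiplicative_decrypt; infer_instance

-- ===== CLAIM (what is proved, stated in full; the proofs are below) =====
def Claim_equal_multiplicative_decrypt : Prop := ∀ (cipher_text : String) (key : Int), Dom_multiplicative_decrypt cipher_text key → Spec_multiplicative_decrypt cipher_text key (multiplicative_decrypt cipher_text key)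

-- ===== LEMMAS AND PROOFS =====

theorem pymod26 (a : Int) : PySem.Int.mod a 26 = a % 26 :=
  PySem.Int.mod_eq_emod_of_pos (by norm_num)

-- A's inverse search only depends on key modulo 26
theorem mod_inverse_mod (key : Int) : mod_inverse key 26 = mod_inverse (PySem.Int.mod key 26) 26 := by
  unfold mod_inverse
  congr 1
  funext i
  simp only [pymod26]
  rw [Int.mul_emod key i, Int.mul_emod (key % 26) i, Int.emod_emod_of_dvd]
  exact dvd_refl 26

-- B's inverse computation, as an Option, as the port uses it
def invB (key : Int) : Option Int :=
  let p := egcdLoop 26 26 (PySem.Int.mod key 26) 0 1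
  if p.1 ≠ 1 then none else some (PySem.Int.mod p.2 26)

-- on each of the 26 residues the two inverse computations agree (checked by evaluation)
theorem inv_agree_fin : ∀ r : Fin 26, mod_inverse (r.val : Int) 26 = invB (r.val : Int) := by decide

theorem inv_agree (key : Int) : mod_inverse key 26 = invB key := by
  have hb : 0 ≤ PySem.Int.mod key 26 ∧ PySem.Int.mod key 26 < 26 := by
    rw [pymod26]; omega
  have hfin : (PySem.Int.mod key 26).toNat < 26 := by omega
  have hcast : ((PySem.Int.mod key 26).toNat : Int) = PySem.Int.mod key 26 := by omega
  have hr := inv_agree_fin ⟨(PySem.Int.mod key 26).toNat, hfin⟩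
  simp only [hcast] at hr
  rw [mod_inverse_mod, hr]
  unfold invB
  have hmm : PySem.Int.mod (PySem.Int.mod key 26) 26 = PySem.Int.mod key 26 := by
    simp only [pymod26]; omega
  rw [hmm]

-- the substitution table B builds for a given inverse value
def tableOf (inv : Int) : PySem.Dict Char Char :=
  PySem.Dict.ofList
    ((PySem.List.enumerate pvAlphabet).map (fun q =>
      (q.2, PySem.List.pyGetD pvAlphabet (PySem.Int.mod (q.1 * inv) 26) 'A')))

theorem items_tableOf (inv : Int) :
    (tableOf inv).items =
      (PySem.List.enumerate pvAlphabet).map (fun q =>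
        (q.2, PySem.List.pyGetD pvAlphabet (PySem.Int.mod (q.1 * inv) 26) 'A')) := by
  unfold tableOf PySem.Dict.ofList PySem.Dict.update
  rw [PySem.Dict.items_foldl_insert_fresh _ Prod.fst Prod.snd PySem.Dict.empty
       (by intro a _; simp [PySem.Dict.contains_empty])
       (by simp only [List.map_map]
           have h : (Prod.fst ∘ fun q : Int × Char =>
               (q.2, PySem.List.pyGetD pvAlphabet (PySem.Int.mod (q.1 * inv) 26) 'A')) = Prod.snd := rfl
           rw [h, PySem.List.map_snd_enumerate]
           decide)]
  simp [PySem.Dict.empty]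

theorem keys_tableOf (inv : Int) : (tableOf inv).keys = pvAlphabet := by
  show ((tableOf inv).items).map Prod.fst = pvAlphabet
  rw [items_tableOf]
  simp only [List.map_map]
  have h : (Prod.fst ∘ fun q : Int × Char =>
      (q.2, PySem.List.pyGetD pvAlphabet (PySem.Int.mod (q.1 * inv) 26) 'A')) = Prod.snd := rfl
  rw [h, PySem.List.map_snd_enumerate]

theorem getD_tableOf_not_mem (inv : Int) (ch : Char) (h : ch ∉ pvAlphabet) :
    (tableOf inv).getD ch ch = ch := by
  apply PySem.Dict.getD_of_not_contains
  rw [← Bool.not_eq_true, PySem.Dict.contains_iff_mem_keys, keys_tableOf]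
  exact h

theorem getD_tableOf_mem (inv : Int) (i : Nat) (hi : i < pvAlphabet.length) :
    (tableOf inv).getD pvAlphabet[i] pvAlphabet[i] =
      PySem.List.pyGetD pvAlphabet (PySem.Int.mod ((i : Int) * inv) 26) 'A' := by
  apply PySem.Dict.getD_of_mem_items
  · rw [items_tableOf]
    refine List.mem_map.mpr ⟨((i : Int), pvAlphabet[i]), ?_, rfl⟩
    rw [PySem.List.mem_enumerate_iff]
    exact ⟨i, hi, by simp⟩
  · rw [keys_tableOf]; decide

-- A's membership test and index search on an alphabet character (checked by evaluation)
theorem find_alpha : ∀ i : Fin 26,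
    PySem.Chars.isIn [pvAlphabet[(i : Nat)]] pvAlphabet = true ∧
    PySem.Chars.find pvAlphabet [pvAlphabet[(i : Nat)]] = (i : Int) := by decide

theorem isIn_not_mem (ch : Char) (h : ch ∉ pvAlphabet) :
    PySem.Chars.isIn [ch] pvAlphabet = false := by
  rw [PySem.Chars.isIn_eq_false_iff]
  intro hinf
  exact h (hinf.mem (by simp))

-- per-character agreement of the two translation steps, for any inverse value
theorem step_agree (inv : Int) (ch : Char) :
    (if PySem.Chars.isIn [ch] pvAlphabet then
       PySem.List.pyGetD pvAlphabet
         (PySem.Int.mod (PySem.Chars.find pvAlphabet [ch] * inv) 26) 'A'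
     else ch) = (tableOf inv).getD ch ch := by
  by_cases h : ch ∈ pvAlphabet
  · obtain ⟨i, hi, rfl⟩ := List.mem_iff_getElem.mp h
    have hi26 : i < 26 := hi
    have hfa := find_alpha ⟨i, hi26⟩
    simp only at hfa
    rw [hfa.1, getD_tableOf_mem inv i hi, hfa.2]
    simp
  · rw [isIn_not_mem ch h, getD_tableOf_not_mem inv ch h]
    simp

-- ===== VERDICT (by name: the statement is the Claim_ definition above) =====
theorem multiplicative_decrypt_spec : Claim_equal_multiplicative_decrypt := by
  intro cipher_text key _
  show multiplicative_decrypt cipher_text key = multiplicative_decrypt_alt cipher_text key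
  unfold multiplicative_decrypt multiplicative_decrypt_alt
  rw [inv_agree]
  unfold invB
  by_cases h : (egcdLoop 26 26 (PySem.Int.mod key 26) 0 1).1 = 1
  case neg =>
    simp only [h, ne_eq, not_false_eq_true, if_pos]
  case pos =>
    simp only [h, ne_eq, not_true_eq_false, if_neg, not_false_eq_true]
    congr 1
    have hbody : (fun (acc : List Char) char =>
        if PySem.Chars.isIn [char] pvAlphabet then
          acc ++ [PySem.List.pyGetD pvAlphabet
            (PySem.Int.mod (PySem.Chars.find pvAlphabet [char] *
               PySem.Int.mod (egcdLoop 26 26 (PySem.Int.mod key 26) 0 1).2 26) 26) 'A']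
        else acc ++ [char]) =
        (fun acc char => acc ++ [if PySem.Chars.isIn [char] pvAlphabet then
          PySem.List.pyGetD pvAlphabet
            (PySem.Int.mod (PySem.Chars.find pvAlphabet [char] *
               PySem.Int.mod (egcdLoop 26 26 (PySem.Int.mod key 26) 0 1).2 26) 26) 'A'
          else char]) := by
      funext acc char; split <;> rfl
    rw [hbody, PySem.List.foldl_append_singleton_eq_map]
    simp only [List.nil_append]
    exact List.map_congr_left (fun ch _ => step_agree _ ch)
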